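-- pv_equiv track=rewrite | github.com/Kevins-repos/ENGRLabs | unit 7/name_game.py | firstSyllable
-- ===== SOURCE A (Python) =====
-- def firstSyllable(fullName):
--     vowels = 'aeiou'
--     strList = []
--     for i in fullName.lower():
--         strList.append(i)
--     j = 0
--     while j<len(strList):
--         if strList[j] in vowels:
--             k = j+1
--             while k<len(strList):
--                 if strList[k] in vowels:
-- #                   return fullName[j:k+1]
--                     return fullName[j:].lower()
--                 k+=1
--             return fullName[j:].lower()
--         j+=1
--     return fullName.lower()
-- ===== SOURCE B (Python) =====
-- def firstSyllable(fullName):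
--     low = fullName.lower()
--     hits = [p for p in (low.find(v) for v in 'aeiou') if p != -1]
--     if not hits:
--         return low
--     return low[min(hits):]
-- ===== Notes on version B (the rewrite author's own statement) =====
-- stated objective: faster
-- what changed: Replaces A's explicit char-by-char while-loop scan (with a redundant inner while that returns the same slice either way) by five whole-string find() calls, one per vowel, taking the minimum non-negative position and slicing the lowercased string there.
import Mathlib
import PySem

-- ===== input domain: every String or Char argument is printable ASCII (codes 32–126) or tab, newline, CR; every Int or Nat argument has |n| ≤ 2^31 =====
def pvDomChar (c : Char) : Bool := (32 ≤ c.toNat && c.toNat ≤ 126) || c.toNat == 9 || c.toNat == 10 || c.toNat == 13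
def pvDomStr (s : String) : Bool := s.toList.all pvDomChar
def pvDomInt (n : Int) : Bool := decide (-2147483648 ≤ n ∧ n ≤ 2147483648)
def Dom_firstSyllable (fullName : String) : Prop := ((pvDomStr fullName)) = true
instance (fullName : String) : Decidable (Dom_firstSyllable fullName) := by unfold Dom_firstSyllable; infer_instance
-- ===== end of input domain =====

-- B replaces A's char-by-char while-loop scan with five whole-string find() calls (one per
-- vowel), taking the minimum non-negative position (constant-factor speedup via built-in find).

-- ===== PORT A =====
-- inner 'while k<len(strList)': whether a later vowel exists or not, both returns are
-- 'return fullName[j:].lower()' (the commented-out line in the source explains the shape)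
def fsInner (fullName : String) (strList : List Char) (j k : Nat) : String :=
  if _h : k < strList.length then
    if ("aeiou".toList).contains strList[k] then
      PySem.Str.lower (PySem.Str.slice fullName (some (j : Int)) none)
    else fsInner fullName strList j (k + 1)
  else
    PySem.Str.lower (PySem.Str.slice fullName (some (j : Int)) none)
termination_by strList.length - k

-- outer 'while j<len(strList)'
def fsOuter (fullName : String) (strList : List Char) (j : Nat) : String :=
  if _h : j < strList.length then
    if ("aeiou".toList).contains strList[j] then
      fsInner fullName strList j (j + 1)
    else fsOuter fullName strList (j + 1)
  else
    PySem.Str.lower fullName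
termination_by strList.length - j

def firstSyllable (fullName : String) : String :=
  -- strList = [] ; for i in fullName.lower(): strList.append(i)
  let strList : List Char :=
    (PySem.Str.lower fullName).toList.foldl (fun acc i => acc ++ [i]) []
  fsOuter fullName strList 0

-- ===== PORT B =====
def firstSyllable_alt (fullName : String) : String :=
  let low := PySem.Str.lower fullName
  let hits := (("aeiou".toList).map (fun v => PySem.Str.find low (String.ofList [v]))).filter
      (fun p => p != -1)
  match PySem.List.min? hits id with
  | none => low
  | some j => PySem.Str.slice low (some j) none

-- ===== PRECONDITION & SPEC =====
def Spec_firstSyllable (fullName : String) (out : String) : Prop := out = firstSyllable_alt fullName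
instance (fullName : String) (out : String) : Decidable (Spec_firstSyllable fullName out) := by unfold Spec_firstSyllable; infer_instance

-- ===== CLAIM (what is proved, stated in full; the proofs are below) =====
def Claim_equal_firstSyllable : Prop := ∀ (fullName : String), Dom_firstSyllable fullName → Spec_firstSyllable fullName (firstSyllable fullName)

-- ===== LEMMAS AND PROOFS =====

def isVowel (c : Char) : Bool := ("aeiou".toList).contains c

theorem isVowel_iff (c : Char) : isVowel c = true ↔ c ∈ "aeiou".toList := by
  simp [isVowel]

theorem foldl_append_id (xs acc : List Char) :
    xs.foldl (fun acc i => acc ++ [i]) acc = acc ++ xs := by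
  induction xs generalizing acc with
  | nil => simp
  | cons x xs ih => simp [List.foldl, ih]

theorem fsInner_eq (fullName : String) (strList : List Char) (j k : Nat) :
    fsInner fullName strList j k
      = PySem.Str.lower (PySem.Str.slice fullName (some (j : Int)) none) := by
  unfold fsInner
  split
  · split
    · rfl
    · exact fsInner_eq fullName strList j (k + 1)
  · rfl
termination_by strList.length - k

theorem fsOuter_eq (fullName : String) (strList : List Char) (j : Nat) :
    fsOuter fullName strList j
      = match (strList.drop j).findIdx? isVowel with
        | none => PySem.Str.lower fullName
        | some i => PySem.Str.lower (PySem.Str.slice fullName (some ((j + i : Nat) : Int)) none) := by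
  unfold fsOuter
  split
  · rename_i h
    rw [List.drop_eq_getElem_cons h, List.findIdx?_cons]
    by_cases hv : isVowel strList[j] = true
    · have hv' : ("aeiou".toList).contains strList[j] = true := hv
      rw [if_pos hv, if_pos hv', fsInner_eq]
      simp
    · have hv' : ¬ ("aeiou".toList).contains strList[j] = true := hv
      rw [if_neg hv, if_neg hv']
      rw [fsOuter_eq fullName strList (j + 1)]
      cases hfi : (strList.drop (j + 1)).findIdx? isVowel with
      | none => simp
      | some i =>
          simp only [Option.map_some]
          show PySem.Str.lower (PySem.Str.slice fullName (some ((j + 1 + i : Nat) : Int)) none)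
              = PySem.Str.lower (PySem.Str.slice fullName (some ((j + (i + 1) : Nat) : Int)) none)
          have h3 : j + 1 + i = j + (i + 1) := by omega
          rw [h3]
  · rename_i h
    rw [List.drop_eq_nil_of_le (by omega)]
    simp
termination_by strList.length - j

-- min? step lemmas (phrased through min? itself so the fold function stays min?'s own)
theorem min?_singleton (a : Int) : PySem.List.min? [a] id = some a := rfl

theorem min?_cons_cons (a x : Int) (xs : List Int) :
    PySem.List.min? (a :: x :: xs) id
      = PySem.List.min? ((if x < a then x else a) :: xs) id := by
  unfold PySem.List.min?
  by_cases h : x < a <;> simp [h]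

theorem min?_spec : ∀ (L : List Int) (m : Int), PySem.List.min? L id = some m →
    m ∈ L ∧ ∀ p ∈ L, m ≤ p
  | [], m, h => by simp [PySem.List.min?] at h
  | [a], m, h => by
      rw [min?_singleton] at h
      cases h
      simp
  | a :: x :: xs, m, h => by
      rw [min?_cons_cons] at h
      obtain ⟨h1, h2⟩ := min?_spec _ m h
      by_cases hxa : x < a <;> simp only [hxa, if_pos, if_false] at h1 h2
      · refine ⟨?_, ?_⟩
        · rcases List.mem_cons.mp h1 with h' | h'
          · exact by simp [h']
          · simp [h']
        · intro p hp
          have hma : m ≤ x := h2 x (by simp)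
          rcases List.mem_cons.mp hp with h' | h'
          · omega
          · rcases List.mem_cons.mp h' with h'' | h''
            · omega
            · exact h2 p (by simp [h''])
      · refine ⟨?_, ?_⟩
        · rcases List.mem_cons.mp h1 with h' | h'
          · exact by simp [h']
          · simp [h']
        · intro p hp
          have hma : m ≤ a := h2 a (by simp)
          rcases List.mem_cons.mp hp with h' | h'
          · omega
          · rcases List.mem_cons.mp h' with h'' | h''
            · omega
            · exact h2 p (by simp [h''])
termination_by L => L.length

theorem min?_isSome : ∀ (L : List Int), L ≠ [] → ∃ m, PySem.List.min? L id = some m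
  | [], h => absurd rfl h
  | [a], _ => ⟨a, min?_singleton a⟩
  | a :: x :: xs, _ => by
      rw [min?_cons_cons]
      exact min?_isSome _ (by simp)
termination_by L => L.length

theorem min?_eq_of (l : List Int) (i : Int) (hmem : i ∈ l) (hle : ∀ p ∈ l, i ≤ p) :
    PySem.List.min? l id = some i := by
  obtain ⟨m, hres⟩ := min?_isSome l (by rintro rfl; simp at hmem)
  obtain ⟨h1, h2⟩ := min?_spec l m hres
  have : m = i := le_antisymm (h2 i hmem) (hle m h1)
  rw [hres, this]

-- singleton prefix / infix characterisations
theorem singleton_prefix_iff (v : Char) (l : List Char) : [v] <+: l ↔ l[0]? = some v := by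
  cases l with
  | nil => simp
  | cons x xs =>
      constructor
      · rintro ⟨t, ht⟩
        simp only [List.singleton_append] at ht
        cases ht
        simp
      · intro h
        simp at h
        exact ⟨xs, by simp [h]⟩

theorem singleton_infix_iff (v : Char) (l : List Char) : [v] <:+: l ↔ v ∈ l := by
  constructor
  · intro h
    have := h.sublist
    simpa using this
  · intro h
    obtain ⟨pre, post, rfl⟩ := List.append_of_mem h
    exact ⟨pre, post, by simp⟩

-- find on a single character: exactly the first index holding that character
theorem find_singleton_eq (cs : List Char) (i : Nat) (v : Char)
    (hi : cs[i]? = some v) (hmin : ∀ k < i, cs[k]? ≠ some v) :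
    PySem.Chars.find cs [v] = (i : Int) := by
  have hnn : 0 ≤ PySem.Chars.find cs [v] := by
    rw [PySem.Chars.find_nonneg_iff, singleton_infix_iff]
    exact List.mem_of_getElem? hi
  obtain ⟨hpre, hlt⟩ := PySem.Chars.find_spec hnn
  rw [singleton_prefix_iff] at hpre
  have hilen : i < cs.length := (List.getElem?_eq_some_iff.mp hi).1
  have h1 : cs[(PySem.Chars.find cs [v]).toNat]? = some v := by
    rw [List.getElem?_drop] at hpre
    simpa using hpre
  set n := (PySem.Chars.find cs [v]).toNat with hn
  have hni : n = i := by
    by_contra hne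
    rcases Nat.lt_or_ge n i with h | h
    · exact hmin n h h1
    · have : i < n := by omega
      have := hlt i this
      rw [singleton_prefix_iff, List.getElem?_drop] at this
      simp only [Nat.add_zero] at this
      exact this hi
  omega

theorem lower_slice (f : String) (n : Nat) :
    PySem.Str.lower (PySem.Str.slice f (some (n : Int)) none)
      = PySem.Str.slice (PySem.Str.lower f) (some (n : Int)) none := by
  apply String.toList_inj.mp
  simp only [PySem.Str.toList_lower, PySem.Str.toList_slice, PySem.Chars.slice_eq_listSlice,
    PySem.List.slice_from_natCast]
  show PySem.Chars.lower (f.toList.drop n) = (PySem.Chars.lower f.toList).drop n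
  show (f.toList.drop n).map PySem.Chars.lowerChar = (f.toList.map PySem.Chars.lowerChar).drop n
  exact List.map_drop

-- ===== VERDICT (by name: the statement is the Claim_ definition above) =====
theorem firstSyllable_spec : Claim_equal_firstSyllable := by
  intro fullName _
  unfold Spec_firstSyllable firstSyllable firstSyllable_alt
  rw [foldl_append_id, List.nil_append, fsOuter_eq]
  simp only [List.drop_zero]
  set low := PySem.Str.lower fullName with hlow
  set cs := low.toList with hcs
  have hfind : ∀ v : Char, PySem.Str.find low (String.ofList [v]) = PySem.Chars.find cs [v] := by
    intro v
    rw [PySem.Str.find_eq, hcs]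
    simp
  cases hfi : cs.findIdx? isVowel with
  | none =>
      have hnov : ∀ c ∈ cs, isVowel c = false := by
        simpa using List.findIdx?_eq_none_iff.mp hfi
      have hempty : ((("aeiou".toList).map (fun v => PySem.Str.find low (String.ofList [v]))).filter
          (fun p => p != -1)) = [] := by
        rw [List.filter_eq_nil_iff]
        intro p hp
        obtain ⟨v, hv, rfl⟩ := List.mem_map.mp hp
        have hfv : PySem.Chars.find cs [v] = -1 := by
          rw [PySem.Chars.find_eq_neg_one_iff, singleton_infix_iff]
          intro hmem
          exact absurd ((isVowel_iff v).mpr hv) (by simp [hnov v hmem])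
        rw [hfind v, hfv]
        simp
      rw [hempty]
      rfl
  | some i =>
      obtain ⟨hilen, hvow, hmin⟩ := by
        have := List.findIdx?_eq_some_iff_getElem.mp hfi
        exact this
      -- handle the statement shape below
      have hvmem : cs[i] ∈ "aeiou".toList := by
        exact (isVowel_iff _).mp hvow
      have hfind_i : PySem.Chars.find cs [cs[i]] = (i : Int) := by
        apply find_singleton_eq cs i cs[i] (by simp [hilen])
        intro k hk hck
        have hkl : k < cs.length := by omega
        rw [List.getElem?_eq_getElem hkl] at hck
        have heq : cs[k] = cs[i] := by simpa using hck
        have hmk := hmin k hk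
        rw [heq] at hmk
        exact hmk hvow
      have hmemhits : (i : Int) ∈ ((("aeiou".toList).map (fun v => PySem.Str.find low (String.ofList [v]))).filter
          (fun p => p != -1)) := by
        rw [List.mem_filter]
        constructor
        · exact List.mem_map.mpr ⟨cs[i], hvmem, by rw [hfind, hfind_i]⟩
        · have hne : (i : Int) ≠ -1 := by omega
          simp [hne]
      have hlb : ∀ p ∈ ((("aeiou".toList).map (fun v => PySem.Str.find low (String.ofList [v]))).filter
          (fun p => p != -1)), (i : Int) ≤ p := by
        intro p hp
        obtain ⟨hp1, hp2⟩ := List.mem_filter.mp hp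
        obtain ⟨v, hv, rfl⟩ := List.mem_map.mp hp1
        rw [hfind] at hp2 ⊢
        have hnn : 0 ≤ PySem.Chars.find cs [v] := by
          have h1 := PySem.Chars.neg_one_le_find (s := cs) (sub := [v])
          simp at hp2
          omega
        obtain ⟨hpre, _⟩ := PySem.Chars.find_spec hnn
        rw [singleton_prefix_iff, List.getElem?_drop, Nat.add_zero] at hpre
        set n := (PySem.Chars.find cs [v]).toNat with hn
        have hnlen : n < cs.length := (List.getElem?_eq_some_iff.mp hpre).1
        have hvn : cs[n] = v := by
          have := (List.getElem?_eq_some_iff.mp hpre).2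
          simpa using this
        have : ¬ n < i := by
          intro hni
          have hmn := hmin n hni
          rw [hvn] at hmn
          exact hmn ((isVowel_iff v).mpr hv)
        omega
      rw [min?_eq_of _ (i : Int) hmemhits hlb]
      simp only [Nat.zero_add]
      rw [lower_slice]
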